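-- pv_equiv track=rewrite | github.com/Sierraki/Solutions | 力扣&Leetcode/算法&algorithm/题库/3688.偶数的按位或运算.py | evenNumberBitwiseORs
-- ===== SOURCE A (Python) =====
-- from typing import List
--
-- def evenNumberBitwiseORs(nums: List[int]) -> int:
--     tar = [i for i in nums if i % 2 == 0]
--     if not tar:
--         return 0
--     ans = tar[0]
--     for i in tar:
--         ans = ans | i
--     return ans
-- ===== SOURCE B (Python) =====
-- from typing import List
--
-- def evenNumberBitwiseORs(nums: List[int]) -> int:
--     if not nums:
--         return 0
--     if len(nums) == 1:
--         return nums[0] if nums[0] % 2 == 0 else 0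
--     mid = len(nums) // 2
--     return evenNumberBitwiseORs(nums[:mid]) | evenNumberBitwiseORs(nums[mid:])
-- ===== Notes on version B (the rewrite author's own statement) =====
-- stated objective: alternative
-- what changed: Replaces A's sequential filter-then-fold (build the list of evens, seed with its first element, OR left to right) by a divide-and-conquer recursion that splits the list in half, recursively ORs the even numbers of each half, and combines the halves with a single OR; correctness rests on OR being associative with identity 0.
import Mathlib
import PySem

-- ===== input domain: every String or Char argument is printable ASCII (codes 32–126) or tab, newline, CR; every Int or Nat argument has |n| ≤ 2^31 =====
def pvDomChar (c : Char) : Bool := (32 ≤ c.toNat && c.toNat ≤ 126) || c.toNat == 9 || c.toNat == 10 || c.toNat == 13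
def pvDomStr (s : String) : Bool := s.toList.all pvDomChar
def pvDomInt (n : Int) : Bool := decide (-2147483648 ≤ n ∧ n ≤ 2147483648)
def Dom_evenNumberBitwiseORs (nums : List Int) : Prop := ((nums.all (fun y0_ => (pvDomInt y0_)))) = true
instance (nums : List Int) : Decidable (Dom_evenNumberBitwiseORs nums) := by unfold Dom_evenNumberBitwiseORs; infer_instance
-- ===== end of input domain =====

-- B replaces A's filter-then-fold by a divide-and-conquer recursion on list halves; objective: alternative

-- ===== PORT A =====
def evenNumberBitwiseORs (nums : List Int) : Int :=
  let tar := nums.filter (fun i => PySem.Int.mod i 2 == 0)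
  match tar with
  | [] => 0
  | h :: t => (h :: t).foldl (fun ans i => PySem.Int.bor ans i) h

-- ===== PORT B =====
-- slices nums[:mid] / nums[mid:] with 0 ≤ mid ≤ len are exactly take/drop (PySem.List.slice_to/slice_from)
def evenNumberBitwiseORs_alt (nums : List Int) : Int :=
  match nums with
  | [] => 0
  | [n] => if PySem.Int.mod n 2 == 0 then n else 0
  | a :: b :: t =>
    let mid := (a :: b :: t).length / 2
    PySem.Int.bor (evenNumberBitwiseORs_alt ((a :: b :: t).take mid))
                  (evenNumberBitwiseORs_alt ((a :: b :: t).drop mid))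
termination_by nums.length
decreasing_by
  · simp only [List.length_take, List.length_cons]; omega
  · simp only [List.length_drop, List.length_cons]; omega

-- ===== PRECONDITION & SPEC =====
def Spec_evenNumberBitwiseORs (nums : List Int) (out : Int) : Prop := out = evenNumberBitwiseORs_alt nums
instance (nums : List Int) (out : Int) : Decidable (Spec_evenNumberBitwiseORs nums out) := by unfold Spec_evenNumberBitwiseORs; infer_instance

-- ===== CLAIM (what is proved, stated in full; the proofs are below) =====
def Claim_equal_evenNumberBitwiseORs : Prop := ∀ (nums : List Int), Dom_evenNumberBitwiseORs nums → Spec_evenNumberBitwiseORs nums (evenNumberBitwiseORs nums)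

-- ===== LEMMAS AND PROOFS =====

theorem ldiff_add_and (n : Nat) : ∀ m : Nat, Nat.ldiff n m + (n &&& m) = n := by
  induction n using Nat.binaryRec with
  | zero =>
    intro m
    simp [Nat.ldiff, Nat.bitwise_zero_left]
  | bit b k ih =>
    intro m
    cases m using Nat.bitCasesOn with
    | bit c l =>
      rw [Nat.ldiff_bit, Nat.land_bit]
      have hkl := ih l
      cases b <;> cases c <;> simp [Nat.bit] <;> omega

theorem bor_eq_lor (a b : Int) : PySem.Int.bor a b = Int.lor a b := by
  unfold PySem.Int.bor
  cases a with
  | ofNat m =>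
    cases b with
    | ofNat n => simp [Int.lor]
    | negSucc n =>
      have h : (0 : Int) ≤ Int.ofNat m := Int.natCast_nonneg m
      have h2 : ¬ (0 : Int) ≤ Int.negSucc n := by omega
      simp only [h, h2, if_true, if_false]
      have he : (-(Int.negSucc n) - 1).toNat = n := by omega
      have ht : (Int.ofNat m).toNat = m := rfl
      rw [he, ht]
      have := ldiff_add_and n m
      show -(↑(n - (n &&& m)) : Int) - 1 = Int.lor (Int.ofNat m) (Int.negSucc n)
      have : (n - (n &&& m)) = Nat.ldiff n m := by omega
      rw [this]
      show _ = Int.negSucc (Nat.ldiff n m)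
      omega
  | negSucc m =>
    cases b with
    | ofNat n =>
      have h : ¬ (0 : Int) ≤ Int.negSucc m := by omega
      have h2 : (0 : Int) ≤ Int.ofNat n := Int.natCast_nonneg n
      simp only [h, h2, if_true, if_false]
      have he : (-(Int.negSucc m) - 1).toNat = m := by omega
      have ht : (Int.ofNat n).toNat = n := rfl
      rw [he, ht]
      have := ldiff_add_and m n
      show -(↑(m - (m &&& n)) : Int) - 1 = Int.lor (Int.negSucc m) (Int.ofNat n)
      have : (m - (m &&& n)) = Nat.ldiff m n := by omega
      rw [this]
      show _ = Int.negSucc (Nat.ldiff m n)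
      omega
    | negSucc n =>
      have h : ¬ (0 : Int) ≤ Int.negSucc m := by omega
      have h2 : ¬ (0 : Int) ≤ Int.negSucc n := by omega
      simp only [h, h2, if_false]
      have he : (-(Int.negSucc m) - 1).toNat = m := by omega
      have he2 : (-(Int.negSucc n) - 1).toNat = n := by omega
      rw [he, he2]
      show _ = Int.negSucc (m &&& n)
      omega

theorem lor_assoc_int (a b c : Int) : Int.lor (Int.lor a b) c = Int.lor a (Int.lor b c) := by
  cases a with
  | ofNat x =>
    cases b with
    | ofNat y =>
      cases c with
      | ofNat z => simp [Int.lor, Nat.or_assoc]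
      | negSucc z =>
        simp only [Int.lor, Int.negSucc.injEq]
        apply Nat.eq_of_testBit_eq
        intro i
        simp only [Nat.testBit_ldiff, Nat.testBit_lor]
        cases hx : x.testBit i <;> cases hy : y.testBit i <;> cases hz : z.testBit i <;> simp
    | negSucc y =>
      cases c with
      | ofNat z =>
        simp only [Int.lor, Int.negSucc.injEq]
        apply Nat.eq_of_testBit_eq
        intro i
        simp only [Nat.testBit_ldiff]
        cases hx : x.testBit i <;> cases hy : y.testBit i <;> cases hz : z.testBit i <;> simp
      | negSucc z =>
        simp only [Int.lor, Int.negSucc.injEq]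
        apply Nat.eq_of_testBit_eq
        intro i
        simp only [Nat.testBit_ldiff, Nat.testBit_land]
        cases hx : x.testBit i <;> cases hy : y.testBit i <;> cases hz : z.testBit i <;> simp
  | negSucc x =>
    cases b with
    | ofNat y =>
      cases c with
      | ofNat z =>
        simp only [Int.lor, Int.negSucc.injEq]
        apply Nat.eq_of_testBit_eq
        intro i
        simp only [Nat.testBit_ldiff, Nat.testBit_lor]
        cases hx : x.testBit i <;> cases hy : y.testBit i <;> cases hz : z.testBit i <;> simp
      | negSucc z =>
        simp only [Int.lor, Int.negSucc.injEq]
        apply Nat.eq_of_testBit_eq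
        intro i
        simp only [Nat.testBit_ldiff, Nat.testBit_land]
        cases hx : x.testBit i <;> cases hy : y.testBit i <;> cases hz : z.testBit i <;> simp
    | negSucc y =>
      cases c with
      | ofNat z =>
        simp only [Int.lor, Int.negSucc.injEq]
        apply Nat.eq_of_testBit_eq
        intro i
        simp only [Nat.testBit_ldiff, Nat.testBit_land]
        cases hx : x.testBit i <;> cases hy : y.testBit i <;> cases hz : z.testBit i <;> simp
      | negSucc z =>
        simp only [Int.lor, Int.negSucc.injEq]
        apply Nat.eq_of_testBit_eq
        intro i
        simp only [Nat.testBit_land]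
        cases hx : x.testBit i <;> cases hy : y.testBit i <;> cases hz : z.testBit i <;> simp

theorem bor_assoc (a b c : Int) : PySem.Int.bor (PySem.Int.bor a b) c = PySem.Int.bor a (PySem.Int.bor b c) := by
  rw [bor_eq_lor, bor_eq_lor, bor_eq_lor, bor_eq_lor]
  exact lor_assoc_int a b c

theorem bor_self_int (a : Int) : PySem.Int.bor a a = a := by
  unfold PySem.Int.bor
  split_ifs with h
  · simp [Int.toNat_of_nonneg h]
  · simp [Nat.and_self]; omega

theorem bor_zero_left (a : Int) : PySem.Int.bor 0 a = a := by
  rw [PySem.Int.bor_comm]; exact PySem.Int.bor_zero a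

theorem foldl_bor_shift (l : List Int) : ∀ a : Int,
    l.foldl (fun ans i => PySem.Int.bor ans i) a
      = PySem.Int.bor a (l.foldl (fun ans i => PySem.Int.bor ans i) 0) := by
  induction l with
  | nil => intro a; simp [PySem.Int.bor_zero]
  | cons x t ih =>
    intro a
    simp only [List.foldl_cons]
    rw [ih (PySem.Int.bor a x), ih (PySem.Int.bor 0 x), bor_zero_left, bor_assoc]

-- the canonical value: OR of the even elements, seeded with 0
theorem alt_eq_orE (nums : List Int) :
    evenNumberBitwiseORs_alt nums
      = (nums.filter (fun i => PySem.Int.mod i 2 == 0)).foldl (fun ans i => PySem.Int.bor ans i) 0 := by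
  induction nums using evenNumberBitwiseORs_alt.induct with
  | case1 => simp [evenNumberBitwiseORs_alt]
  | case2 n h =>
    simp only [evenNumberBitwiseORs_alt, List.filter, h, if_pos, List.foldl_cons, List.foldl_nil]
    rw [bor_zero_left]
  | case3 n h =>
    simp only [evenNumberBitwiseORs_alt, List.filter, h, List.foldl_nil]
    simp at h
    simp
  | case4 a b t mid ih1 ih2 =>
    rw [evenNumberBitwiseORs_alt, ih1, ih2]
    have hsplit : (a :: b :: t) = ((a :: b :: t).take ((a :: b :: t).length / 2))
        ++ ((a :: b :: t).drop ((a :: b :: t).length / 2)) := (List.take_append_drop _ _).symm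
    rw [← foldl_bor_shift]
    conv_rhs => rw [hsplit, List.filter_append, List.foldl_append]

theorem a_eq_orE (nums : List Int) :
    evenNumberBitwiseORs nums
      = (nums.filter (fun i => PySem.Int.mod i 2 == 0)).foldl (fun ans i => PySem.Int.bor ans i) 0 := by
  unfold evenNumberBitwiseORs
  cases h : nums.filter (fun i => PySem.Int.mod i 2 == 0) with
  | nil => simp
  | cons h t =>
    simp only [List.foldl_cons]
    rw [bor_self_int, bor_zero_left]

-- ===== VERDICT (by name: the statement is the Claim_ definition above) =====
theorem evenNumberBitwiseORs_spec : Claim_equal_evenNumberBitwiseORs := by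
  intro nums _
  unfold Spec_evenNumberBitwiseORs
  rw [a_eq_orE, alt_eq_orE]
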